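-- pv_equiv track=rewrite | github.com/yankwong/mood_journal | parser.py | get_date_dictionary
-- ===== SOURCE A (Python) =====
-- def get_date_dictionary(tweets):
--     date_dictionary = dict()
--
--     for tweet in tweets:
--         tweet_date = tweet["created_at"]
--
--         if tweet_date in date_dictionary.keys():
--             date_dictionary[tweet_date] += ' ' + tweet["text"]
--         else:
--             date_dictionary[tweet_date] = tweet["text"]
--
--     return date_dictionary
-- ===== SOURCE B (Python) =====
-- def get_date_dictionary(tweets):
--     grouped = dict()
--     for tweet in tweets:
--         grouped.setdefault(tweet["created_at"], []).append(tweet["text"])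
--     return {date: ' '.join(texts) for date, texts in grouped.items()}
-- ===== Notes on version B (the rewrite author's own statement) =====
-- stated objective: alternative
-- what changed: Two-phase decomposition: first group texts per date into lists with setdefault/append, then a second pass joins each list with ' ', instead of extending a string in the dict on every tweet.
import Mathlib
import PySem

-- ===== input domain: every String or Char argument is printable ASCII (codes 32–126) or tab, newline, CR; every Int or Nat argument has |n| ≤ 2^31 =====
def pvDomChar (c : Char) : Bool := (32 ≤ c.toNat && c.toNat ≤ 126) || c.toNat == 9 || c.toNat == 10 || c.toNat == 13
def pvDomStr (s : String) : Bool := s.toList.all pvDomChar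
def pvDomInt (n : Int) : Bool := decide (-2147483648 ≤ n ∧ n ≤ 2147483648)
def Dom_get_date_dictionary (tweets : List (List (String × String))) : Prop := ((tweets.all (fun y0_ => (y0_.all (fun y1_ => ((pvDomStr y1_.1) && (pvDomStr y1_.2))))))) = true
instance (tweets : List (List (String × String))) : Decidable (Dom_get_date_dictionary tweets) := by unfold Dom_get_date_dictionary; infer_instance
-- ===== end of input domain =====

-- B groups texts per date into lists and joins them in a second pass, instead of
-- extending a string in the dict per tweet (objective: alternative decomposition).


-- ===== PORT A =====
-- tweet["created_at"] / tweet["text"] raise KeyError when absent; Pre_ requires both keys,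
-- so 'getD … ""' is exact on every admitted input.
def get_date_dictionary (tweets : List (List (String × String))) : List (String × String) :=
  (tweets.foldl (fun date_dictionary tweet =>
      let tweet_date := (PySem.Dict.mk tweet).getD "created_at" ""
      if date_dictionary.contains tweet_date then
        date_dictionary.insert tweet_date
          (date_dictionary.getD tweet_date "" ++ " " ++ (PySem.Dict.mk tweet).getD "text" "")
      else
        date_dictionary.insert tweet_date ((PySem.Dict.mk tweet).getD "text" ""))
    PySem.Dict.empty).items

-- ===== PORT B =====
-- grouped.setdefault(date, []).append(text)  ==  modify date [] (· ++ [text])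
def get_date_dictionary_alt (tweets : List (List (String × String))) : List (String × String) :=
  let grouped : PySem.Dict String (List String) :=
    tweets.foldl (fun grouped tweet =>
        grouped.modify ((PySem.Dict.mk tweet).getD "created_at" "") []
          (fun texts => texts ++ [(PySem.Dict.mk tweet).getD "text" ""]))
      PySem.Dict.empty
  grouped.items.map (fun p => (p.1, PySem.Str.join " " p.2))

-- ===== PRECONDITION & SPEC =====
-- Pre_ excludes exactly the inputs on which Python A raises KeyError: a tweet missing
-- the "created_at" or "text" key.
def Pre_get_date_dictionary (tweets : List (List (String × String))) : Prop :=
  (tweets.all (fun tweet =>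
      (PySem.Dict.mk tweet).contains "created_at" && (PySem.Dict.mk tweet).contains "text")) = true
instance (tweets : List (List (String × String))) : Decidable (Pre_get_date_dictionary tweets) := by
  unfold Pre_get_date_dictionary; infer_instance

def pvWitness_get_date_dictionary : (List (List (String × String))) :=
  [[("created_at", "2020-01-01"), ("text", "hello")],
   [("created_at", "2020-01-01"), ("text", "world")],
   [("created_at", "2020-01-02"), ("text", "bye")]]

def Spec_get_date_dictionary (tweets : List (List (String × String))) (out : List (String × String)) : Prop := out = get_date_dictionary_alt tweets
instance (tweets : List (List (String × String))) (out : List (String × String)) : Decidable (Spec_get_date_dictionary tweets out) := by unfold Spec_get_date_dictionary; infer_instance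

-- ===== CLAIM (what is proved, stated in full; the proofs are below) =====
def Claim_equal_get_date_dictionary : Prop := ∀ (tweets : List (List (String × String))), Dom_get_date_dictionary tweets → Pre_get_date_dictionary tweets → Spec_get_date_dictionary tweets (get_date_dictionary tweets)

-- ===== LEMMAS AND PROOFS =====

-- the value map relating B's grouped entries to A's entries
def pvJoin1 (p : String × List String) : String × String := (p.1, PySem.Str.join " " p.2)

theorem pv_join_singleton (x : String) : PySem.Str.join " " [x] = x := by
  apply String.toList_inj.mp
  simp [PySem.Str.toList_join, PySem.Chars.join_singleton]

theorem pv_join_snoc (l : List String) (x : String) (h : l ≠ []) :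
    PySem.Str.join " " (l ++ [x]) = PySem.Str.join " " l ++ " " ++ x := by
  apply String.toList_inj.mp
  induction l with
  | nil => exact absurd rfl h
  | cons a rest ih =>
    cases rest with
    | nil =>
      simp [PySem.Str.toList_join, PySem.Chars.join_singleton, PySem.Chars.join_cons_cons,
        String.toList_append]
    | cons b rest' =>
      simp only [List.cons_append, PySem.Str.toList_join, List.map_cons,
        PySem.Chars.join_cons_cons, String.toList_append] at *
      simp only [ih (by simp)]
      simp

theorem pv_keys_eq (d : PySem.Dict String String) (g : PySem.Dict String (List String))
    (h : d.items = g.items.map pvJoin1) : d.keys = g.keys := by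
  simp only [PySem.Dict.keys, h, List.map_map]
  rfl

theorem pv_contains_eq (d : PySem.Dict String String) (g : PySem.Dict String (List String))
    (h : d.items = g.items.map pvJoin1) (k : String) : d.contains k = g.contains k := by
  rw [PySem.Dict.contains_eq_decide_mem_keys, PySem.Dict.contains_eq_decide_mem_keys,
    pv_keys_eq d g h]

-- main invariant: A's fold state is pointwise the join of B's fold state
theorem pv_inv (tweets : List (List (String × String)))
    (d : PySem.Dict String String) (g : PySem.Dict String (List String))
    (h : d.items = g.items.map pvJoin1)
    (hnd : g.keys.Nodup)
    (hne : ∀ p ∈ g.items, p.2 ≠ []) :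
    (tweets.foldl (fun date_dictionary tweet =>
        let tweet_date := (PySem.Dict.mk tweet).getD "created_at" ""
        if date_dictionary.contains tweet_date then
          date_dictionary.insert tweet_date
            (date_dictionary.getD tweet_date "" ++ " " ++ (PySem.Dict.mk tweet).getD "text" "")
        else
          date_dictionary.insert tweet_date ((PySem.Dict.mk tweet).getD "text" "")) d).items
    = ((tweets.foldl (fun grouped tweet =>
        grouped.modify ((PySem.Dict.mk tweet).getD "created_at" "") []
          (fun texts => texts ++ [(PySem.Dict.mk tweet).getD "text" ""])) g).items).map pvJoin1 := by
  induction tweets generalizing d g with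
  | nil => simpa using h
  | cons t rest ih =>
    simp only [List.foldl_cons]
    set k := (PySem.Dict.mk t).getD "created_at" "" with hk
    set x := (PySem.Dict.mk t).getD "text" "" with hx
    have hdnd : d.keys.Nodup := by rw [pv_keys_eq d g h]; exact hnd
    by_cases hc : g.contains k = true
    · -- existing key: A appends ' '+x to the string, B appends x to the list
      obtain ⟨l, hl⟩ : ∃ l, g.get? k = some l := by
        have := PySem.Dict.contains_eq_isSome_get? (d := g) (k := k)
        rw [hc] at this
        exact Option.isSome_iff_exists.mp this.symm
      have hlmem : (k, l) ∈ g.items := PySem.Dict.mem_items_of_get?_eq_some g hl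
      have hlne : l ≠ [] := hne _ hlmem
      have hgD : g.getD k [] = l := PySem.Dict.getD_of_mem_items g hlmem hnd []
      have hdmem : (k, PySem.Str.join " " l) ∈ d.items := by
        rw [h]; exact List.mem_map_of_mem hlmem
      have hdD : d.getD k "" = PySem.Str.join " " l :=
        PySem.Dict.getD_of_mem_items d hdmem hdnd ""
      have hcd : d.contains k = true := by rw [pv_contains_eq d g h]; exact hc
      rw [if_pos hcd]
      have hgstep : g.modify k [] (fun texts => texts ++ [x]) = g.insert k (l ++ [x]) := by
        show g.insert k (g.getD k [] ++ [x]) = _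
        rw [hgD]
      rw [hgstep]
      apply ih
      · rw [PySem.Dict.items_insert_of_contains d _ hcd,
          PySem.Dict.items_insert_of_contains g _ hc, h, List.map_map, List.map_map]
        apply List.map_congr_left
        intro p _
        simp only [Function.comp, pvJoin1]
        by_cases hpk : p.1 == k
        · simp only [hpk, if_pos]
          rw [hdD, pv_join_snoc l x hlne]
        · simp [hpk]
      · exact PySem.Dict.nodup_keys_insert g k _ hnd
      · intro p hp
        rcases (PySem.Dict.mem_items_insert g _ _ p).mp hp with hpe | ⟨hpg, _⟩
        · rw [hpe]; simp
        · exact hne _ hpg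
    · -- new key: both append a fresh entry
      have hc' : g.contains k = false := by simpa using hc
      have hcd : d.contains k = false := by rw [pv_contains_eq d g h]; exact hc'
      rw [if_neg (by simp [hcd])]
      have hgstep : g.modify k [] (fun texts => texts ++ [x]) = g.insert k [x] := by
        show g.insert k (g.getD k [] ++ [x]) = _
        rw [PySem.Dict.getD_of_not_contains g [] hc']
        simp
      rw [hgstep]
      apply ih
      · rw [PySem.Dict.items_insert_of_not_contains d _ hcd,
          PySem.Dict.items_insert_of_not_contains g _ hc', h, List.map_append]
        simp [pvJoin1, pv_join_singleton]
      · exact PySem.Dict.nodup_keys_insert g k _ hnd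
      · intro p hp
        rcases (PySem.Dict.mem_items_insert g _ _ p).mp hp with hpe | ⟨hpg, _⟩
        · rw [hpe]; simp
        · exact hne _ hpg

-- ===== VERDICT (by name: the statement is the Claim_ definition above) =====
theorem get_date_dictionary_spec : Claim_equal_get_date_dictionary := by
  intro tweets _ _
  show get_date_dictionary tweets = get_date_dictionary_alt tweets
  unfold get_date_dictionary get_date_dictionary_alt
  exact pv_inv tweets PySem.Dict.empty PySem.Dict.empty rfl (by simp) (by simp [PySem.Dict.empty])
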